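-- pv_equiv track=rewrite | github.com/mozilla-services/socorro | webapp-django/crashstats/crashstats/management/commands/bugassociations.py | find_signatures
-- ===== SOURCE A (Python) =====
-- def find_signatures(content):
--     """Return a set of signatures found inside a string
--
--     Signatures are found between `[@` and `]`. There can be any number of them
--     in the content.
--
--     Example:
--
--     >>> find_signatures("some [@ signature] [@ another] and [@ even::this[] ]")
--     set(['signature', 'another', 'even::this[]'])
--
--     """
--     if not content:
--         return set()
--
--     signatures = set()
--     parts = content.split("[@")
--
--     # NOTE(willkg): Because we use split, the first item in the list is always
--     # a non-signature--so skip it.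
--     for part in parts[1:]:
--         try:
--             last_bracket = part.rindex("]")
--             signature = part[:last_bracket].strip()
--             signatures.add(signature)
--         except ValueError:
--             # Raised if ']' is not found in the string. In that case, we
--             # simply ignore this malformed part.
--             pass
--     return signatures
-- ===== SOURCE B (Python) =====
-- def find_signatures(content):
--     """One-pass state machine: scan once, tracking the current segment and the
--     position of the last ']' seen, instead of split('[@') + rindex per part."""
--     sigs = set()
--     buf = None   # text of the current '[@'-segment; None = before the first '[@'
--     last = -1    # index in buf of the last ']' seen so far
--     i = 0
--     n = len(content) if content else 0
--     while i < n:
--         if content.startswith("[@", i):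
--             if buf is not None and last != -1:
--                 sigs.add(buf[:last].strip())
--             buf = ""
--             last = -1
--             i += 2
--         else:
--             if buf is not None:
--                 if content[i] == "]":
--                     last = len(buf)
--                 buf += content[i]
--             i += 1
--     if buf is not None and last != -1:
--         sigs.add(buf[:last].strip())
--     return sigs
-- ===== Notes on version B (the rewrite author's own statement) =====
-- stated objective: alternative
-- what changed: Replaces split('[@') plus a per-part rindex(']') scan with a single left-to-right state-machine pass that tracks the current segment and the position of the last ']' online.
import Mathlib
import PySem

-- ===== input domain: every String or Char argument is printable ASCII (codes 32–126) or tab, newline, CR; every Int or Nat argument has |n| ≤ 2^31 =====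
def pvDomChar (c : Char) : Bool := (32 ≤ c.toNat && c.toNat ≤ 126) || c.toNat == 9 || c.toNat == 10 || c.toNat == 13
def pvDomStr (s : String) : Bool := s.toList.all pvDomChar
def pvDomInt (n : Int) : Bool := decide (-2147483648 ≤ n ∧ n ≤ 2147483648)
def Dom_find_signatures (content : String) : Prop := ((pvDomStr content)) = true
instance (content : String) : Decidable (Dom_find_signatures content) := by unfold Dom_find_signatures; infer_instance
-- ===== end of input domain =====

-- B replaces split("[@") + per-part rindex by a single left-to-right scan that tracks
-- the current segment and the position of the last ']' online (objective: alternative).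

-- lemma used by the ports' termination proofs
theorem pvPrefixTwoLe {l : List Char} (h : (['[', '@'] : List Char).isPrefixOf l = true) :
    2 ≤ l.length := by
  have hp : (['[', '@'] : List Char) <+: l := by
    simpa using List.isPrefixOf_iff_prefix.mp h
  simpa using hp.length_le

-- ===== PORT A =====
-- body of A's loop: try part.rindex("]") … except ValueError: pass
def pvStepA (sigs : PySem.Set (List Char)) (part : List Char) : PySem.Set (List Char) :=
  let lb := PySem.Chars.rfind part [']']
  if lb = -1 then sigs
  else PySem.Set.add sigs (PySem.Chars.strip (PySem.List.slice part none (some lb)))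

def find_signatures (content : String) : List String :=
  if content = "" then []
  else
    (((PySem.Chars.splitOn content.toList ['[', '@']).drop 1).foldl pvStepA
        (PySem.Set.ofList [])).map String.ofList

-- ===== PORT B =====
-- close the current segment: add buf[:last].strip() unless no ']' was seen (last = -1)
def pvFinish (sigs : PySem.Set (List Char)) (buf : List Char) (last : Int) : PySem.Set (List Char) :=
  if last = -1 then sigs
  else PySem.Set.add sigs (PySem.Chars.strip (PySem.List.slice buf none (some last)))

-- the while-loop of B: state = (remaining input, current segment buf with index of last ']', sigs)
def pvScan : List Char → Option (List Char × Int) → PySem.Set (List Char) → PySem.Set (List Char)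
  | l, st, sigs =>
    if h : (['[', '@'] : List Char).isPrefixOf l then
      pvScan (l.drop 2) (some ([], -1))
        (match st with
         | none => sigs
         | some (buf, last) => pvFinish sigs buf last)
    else
      match l with
      | [] =>
        (match st with
         | none => sigs
         | some (buf, last) => pvFinish sigs buf last)
      | c :: r =>
        match st with
        | none => pvScan r none sigs
        | some (buf, last) =>
            pvScan r (some (buf ++ [c], if c = ']' then (buf.length : Int) else last)) sigs
  termination_by l _ _ => l.length
  decreasing_by
  · have := pvPrefixTwoLe h; simp; omega
  · simp
  · simp

def find_signatures_alt (content : String) : List String :=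
  (pvScan content.toList none (PySem.Set.ofList [])).map String.ofList

-- ===== PRECONDITION & SPEC =====
def Spec_find_signatures (content : String) (out : List String) : Prop := out = find_signatures_alt content
instance (content : String) (out : List String) : Decidable (Spec_find_signatures content out) := by unfold Spec_find_signatures; infer_instance

-- ===== CLAIM (what is proved, stated in full; the proofs are below) =====
def Claim_equal_find_signatures : Prop := ∀ (content : String), Dom_find_signatures content → Spec_find_signatures content (find_signatures content)

-- ===== LEMMAS AND PROOFS =====

-- proof-side re-statement of str.split("[@") as a fuel-free recursion
def pvParts : List Char → List Char → List (List Char)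
  | l, cur =>
    if h : (['[', '@'] : List Char).isPrefixOf l then
      cur.reverse :: pvParts (l.drop 2) []
    else
      match l with
      | [] => [cur.reverse]
      | c :: r => pvParts r (c :: cur)
  termination_by l _ => l.length
  decreasing_by
  · have := pvPrefixTwoLe h; simp; omega
  · simp

theorem pvSplitOnGo_eq_parts (fuel : Nat) :
    ∀ (l cur : List Char) (acc : List (List Char)), l.length < fuel →
      PySem.Chars.splitOn.go ['[', '@'] fuel l cur acc = acc.reverse ++ pvParts l cur := by
  induction fuel with
  | zero => intro l cur acc h; omega
  | succ n ih =>
    intro l cur acc h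
    rw [pvParts]
    cases l with
    | nil =>
      simp [PySem.Chars.splitOn.go]
    | cons c r =>
      rw [PySem.Chars.splitOn.go]
      by_cases hp : (['[', '@'] : List Char).isPrefixOf (c :: r)
      · have h2 := pvPrefixTwoLe hp
        simp only [hp, if_pos, dif_pos]
        have hsep : (['[', '@'] : List Char).length = 2 := rfl
        rw [hsep, ih ((c :: r).drop 2) [] (cur.reverse :: acc) (by simp at h h2 ⊢; omega)]
        simp
      · simp only [hp, if_neg, dif_neg, Bool.false_eq_true, not_false_iff]
        rw [ih r (c :: cur) acc (by simp at h ⊢; omega)]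

theorem pvSplitOn_eq_parts (s : List Char) :
    PySem.Chars.splitOn s ['[', '@'] = pvParts s [] := by
  rw [PySem.Chars.splitOn, pvSplitOnGo_eq_parts (s.length + 1) s [] [] (by omega)]
  simp

theorem pvRfindGo_zero (s sub : List Char) :
    PySem.Chars.rfind.go s sub 0 = if sub.isPrefixOf s then 0 else -1 := by
  rw [PySem.Chars.rfind.go]

theorem pvRfindGo_succ (s sub : List Char) (j : Nat) :
    PySem.Chars.rfind.go s sub (j + 1)
      = if sub.isPrefixOf (s.drop (j + 1)) then ((j : Int) + 1) else PySem.Chars.rfind.go s sub j := by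
  rw [PySem.Chars.rfind.go]
  norm_num

theorem pvRfindGo_append (xs : List Char) (c d : Char) :
    ∀ j, j < xs.length →
      PySem.Chars.rfind.go (xs ++ [c]) [d] j = PySem.Chars.rfind.go xs [d] j := by
  intro j
  induction j with
  | zero =>
    intro hj
    cases xs with
    | nil => simp at hj
    | cons a t => simp [pvRfindGo_zero, List.isPrefixOf]
  | succ m ih =>
    intro hj
    have hd : List.drop (m + 1) (xs ++ [c]) = List.drop (m + 1) xs ++ [c] := by
      rw [List.drop_append_of_le_length (by omega)]
    rw [pvRfindGo_succ, pvRfindGo_succ, hd]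
    obtain ⟨a, t, ht⟩ : ∃ a t, List.drop (m + 1) xs = a :: t := by
      cases hdrop : List.drop (m + 1) xs with
      | nil => have := List.drop_eq_nil_iff.mp hdrop; omega
      | cons a t => exact ⟨a, t, rfl⟩
    rw [ht]
    simp only [List.cons_append, List.isPrefixOf, Bool.and_true]
    split
    · rfl
    · exact ih (by omega)

theorem pvRfind_append (xs : List Char) (c d : Char) :
    PySem.Chars.rfind (xs ++ [c]) [d] =
      if c = d then (xs.length : Int) else PySem.Chars.rfind xs [d] := by
  rw [PySem.Chars.rfind, PySem.Chars.rfind]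
  have hlen : (xs ++ [c]).length = xs.length + 1 := by simp
  rw [hlen, pvRfindGo_succ]
  have h1 : List.drop (xs.length + 1) (xs ++ [c]) = [] :=
    List.drop_eq_nil_iff.mpr (by simp)
  rw [h1]
  simp only [List.isPrefixOf, Bool.false_eq_true, if_false]
  cases xs with
  | nil =>
    have hc : (([] : List Char) ++ [c]) = [c] := by simp
    have h0 : ([] : List Char).length = 0 := rfl
    rw [hc, h0, pvRfindGo_zero, pvRfindGo_zero]
    simp only [List.isPrefixOf, Bool.and_true, beq_iff_eq, Bool.false_eq_true, if_false,
      Nat.cast_zero]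
    by_cases hcd : d = c
    · simp [hcd]
    · have : ¬ c = d := fun h => hcd h.symm
      simp [hcd, this]
  | cons a t =>
    have hl2 : (a :: t).length = t.length + 1 := by simp
    rw [hl2, pvRfindGo_succ, pvRfindGo_succ]
    have h2 : List.drop (t.length + 1) ((a :: t) ++ [c]) = [c] := by simp
    have h3 : List.drop (t.length + 1) (a :: t) = [] :=
      List.drop_eq_nil_iff.mpr (by simp)
    rw [h2, h3]
    simp only [List.isPrefixOf, Bool.and_true, beq_iff_eq, Bool.false_eq_true, if_false]
    rw [pvRfindGo_append (a :: t) c d t.length (by simp)]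
    by_cases hc : d = c
    · simp [hc]
    · have hc' : ¬ c = d := fun h => hc h.symm
      simp [hc, hc']

theorem pvRfind_nil (d : Char) : PySem.Chars.rfind [] [d] = -1 := by
  rw [PySem.Chars.rfind]
  simp [pvRfindGo_zero, List.isPrefixOf]

theorem pvStepA_eq_finish (sigs : PySem.Set (List Char)) (part : List Char) :
    pvStepA sigs part = pvFinish sigs part (PySem.Chars.rfind part [']']) := rfl

theorem pvScan_some (n : Nat) :
    ∀ (l : List Char), l.length ≤ n → ∀ (buf : List Char) (sigs : PySem.Set (List Char)),
      pvScan l (some (buf, PySem.Chars.rfind buf [']'])) sigs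
        = (pvParts l buf.reverse).foldl pvStepA sigs := by
  induction n with
  | zero =>
    intro l hl buf sigs
    have : l = [] := List.length_eq_zero_iff.mp (by omega)
    subst this
    rw [pvScan, pvParts]
    simp [pvStepA_eq_finish]
  | succ n ih =>
    intro l hl buf sigs
    by_cases hp : (['[', '@'] : List Char).isPrefixOf l
    · have h2 := pvPrefixTwoLe hp
      rw [pvScan, pvParts]
      simp only [hp, dif_pos]
      have hnil : (-1 : Int) = PySem.Chars.rfind [] [']'] := (pvRfind_nil ']').symm
      rw [hnil, ih (l.drop 2) (by simp; omega) [] (pvFinish sigs buf (PySem.Chars.rfind buf [']']))]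
      simp [pvStepA_eq_finish]
    · cases l with
      | nil =>
        rw [pvScan, pvParts]
        simp [hp, pvStepA_eq_finish]
      | cons c r =>
        rw [pvScan, pvParts]
        simp only [hp, dif_neg, Bool.false_eq_true, not_false_iff]
        have hif : (if c = ']' then (buf.length : Int) else PySem.Chars.rfind buf [']'])
            = PySem.Chars.rfind (buf ++ [c]) [']'] := by
          rw [pvRfind_append]
        rw [hif, ih r (by simp at hl; omega) (buf ++ [c]) sigs]
        simp

theorem pvScan_none (n : Nat) :
    ∀ (l : List Char), l.length ≤ n → ∀ (cur : List Char) (sigs : PySem.Set (List Char)),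
      pvScan l none sigs = ((pvParts l cur).drop 1).foldl pvStepA sigs := by
  induction n with
  | zero =>
    intro l hl cur sigs
    have : l = [] := List.length_eq_zero_iff.mp (by omega)
    subst this
    rw [pvScan, pvParts]
    simp
  | succ n ih =>
    intro l hl cur sigs
    by_cases hp : (['[', '@'] : List Char).isPrefixOf l
    · have h2 := pvPrefixTwoLe hp
      rw [pvScan, pvParts]
      simp only [hp, dif_pos]
      have hnil : (-1 : Int) = PySem.Chars.rfind [] [']'] := (pvRfind_nil ']').symm
      rw [hnil, pvScan_some n (l.drop 2) (by simp; omega) [] sigs]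
      simp
    · cases l with
      | nil =>
        rw [pvScan, pvParts]
        simp [hp]
      | cons c r =>
        rw [pvScan, pvParts]
        simp only [hp, dif_neg, Bool.false_eq_true, not_false_iff]
        exact ih r (by simp at hl; omega) (c :: cur) sigs

-- ===== VERDICT (by name: the statement is the Claim_ definition above) =====
theorem find_signatures_spec : Claim_equal_find_signatures := by
  intro content _dom
  unfold Spec_find_signatures find_signatures find_signatures_alt
  by_cases h : content = ""
  · subst h
    rw [pvScan]
    simp
  · simp only [h, if_false]
    rw [pvSplitOn_eq_parts,
        pvScan_none content.toList.length content.toList (le_refl _) [] (PySem.Set.ofList [])]
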